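-- pv_equiv track=rewrite | github.com/merlijntishauser/unifi-homelab-ops | backend/app/services/_rule_coverage.py | _ports_cover
-- ===== SOURCE A (Python) =====
-- def _parse_port_constraint(port_range: str) -> tuple[int, int] | None:
--     """Parse a port constraint string into a (low, high) tuple, or None if invalid."""
--     normalized = port_range.strip()
--     if not normalized:
--         return None
--     if "-" not in normalized:
--         try:
--             port = int(normalized)
--         except ValueError:
--             return None
--         return (port, port)
--     low_raw, high_raw = normalized.split("-", 1)
--     try:
--         low = int(low_raw)
--         high = int(high_raw)
--     except ValueError:
--         return None
--     if low > high:
--         return None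
--     return (low, high)
--
-- def _ports_cover(earlier: list[str], later: list[str]) -> bool:
--     """Return True if every port in later is covered by at least one range in earlier."""
--     if not earlier:
--         return True
--     if not later:
--         return False
--     parsed_earlier = [_parse_port_constraint(p) for p in earlier]
--     parsed_later = [_parse_port_constraint(p) for p in later]
--     if any(p is None for p in parsed_earlier + parsed_later):
--         return False
--     earlier_ranges = [p for p in parsed_earlier if p is not None]
--     later_ranges = [p for p in parsed_later if p is not None]
--     return all(
--         any(e_lo <= l_lo and l_hi <= e_hi for e_lo, e_hi in earlier_ranges)
--         for l_lo, l_hi in later_ranges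
--     )
-- ===== SOURCE B (Python) =====
-- def _parse_port_constraint(port_range: str):
--     """Parse a port constraint string into a (low, high) tuple, or None if invalid."""
--     normalized = port_range.strip()
--     if not normalized:
--         return None
--     if "-" not in normalized:
--         try:
--             port = int(normalized)
--         except ValueError:
--             return None
--         return (port, port)
--     low_raw, high_raw = normalized.split("-", 1)
--     try:
--         low = int(low_raw)
--         high = int(high_raw)
--     except ValueError:
--         return None
--     if low > high:
--         return None
--     return (low, high)
--
--
-- def _last_le(best, l):
--     """Index just past the last entry of best (sorted by first component) whose low <= l."""
--     a, b = 0, len(best)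
--     while a < b:
--         m = (a + b) // 2
--         if best[m][0] <= l:
--             a = m + 1
--         else:
--             b = m
--     return a
--
--
-- def _ports_cover(earlier: list, later: list) -> bool:
--     """Return True if every port in later is covered by at least one range in earlier."""
--     if not earlier:
--         return True
--     if not later:
--         return False
--     parsed_earlier = []
--     for p in earlier:
--         r = _parse_port_constraint(p)
--         if r is None:
--             return False
--         parsed_earlier.append(r)
--     parsed_later = []
--     for p in later:
--         r = _parse_port_constraint(p)
--         if r is None:
--             return False
--         parsed_later.append(r)
--     parsed_earlier.sort(key=lambda t: t[0])
--     best = []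
--     cur = None
--     for lo, hi in parsed_earlier:
--         cur = hi if cur is None or hi > cur else cur
--         best.append((lo, cur))
--     for l, h in parsed_later:
--         a = _last_le(best, l)
--         if a == 0 or best[a - 1][1] < h:
--             return False
--     return True
-- ===== Notes on version B (the rewrite author's own statement) =====
-- stated objective: faster
-- what changed: Replaced the nested all/any scan (every later range scanned against every earlier range) by sorting the parsed earlier ranges by low bound, building a prefix-maximum of high bounds, and answering each later range with one binary search on that table.
import Mathlib
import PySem

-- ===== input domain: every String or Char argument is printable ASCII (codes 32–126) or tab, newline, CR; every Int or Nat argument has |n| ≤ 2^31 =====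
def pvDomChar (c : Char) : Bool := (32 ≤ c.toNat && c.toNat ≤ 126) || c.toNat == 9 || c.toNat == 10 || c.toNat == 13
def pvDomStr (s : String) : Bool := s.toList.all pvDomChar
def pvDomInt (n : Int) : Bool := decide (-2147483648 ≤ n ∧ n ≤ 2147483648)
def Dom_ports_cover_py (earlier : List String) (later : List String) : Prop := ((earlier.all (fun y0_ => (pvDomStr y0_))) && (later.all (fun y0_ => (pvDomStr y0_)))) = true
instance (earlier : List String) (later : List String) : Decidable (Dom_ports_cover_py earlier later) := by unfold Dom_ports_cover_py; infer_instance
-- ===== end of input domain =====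

-- B replaces A's nested every-later-against-every-earlier scan by sort + prefix-max + binary search per query.

-- ===== PORT A =====
-- shared helper: _parse_port_constraint (both Pythons contain the identical helper)
def pvParsePort (s : String) : Option (Int × Int) :=
  let t := PySem.Str.strip s
  if t = "" then none
  else if !(PySem.Str.isIn "-" t) then
    match PySem.Int.ofStr? t with
    | none => none
    | some p => some (p, p)
  else
    -- '-' ∈ t and maxsplit = 1 guarantee exactly two pieces; other arms are unreachable totalization
    match PySem.Str.splitMax? t "-" 1 with
    | some [lowRaw, highRaw] =>
      match PySem.Int.ofStr? lowRaw, PySem.Int.ofStr? highRaw with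
      | some lo, some hi => if lo > hi then none else some (lo, hi)
      | _, _ => none
    | _ => none

def ports_cover_py (earlier : List String) (later : List String) : Bool :=
  if earlier = [] then true
  else if later = [] then false
  else
    let parsedE := earlier.map pvParsePort
    let parsedL := later.map pvParsePort
    if (parsedE ++ parsedL).any (fun p => p.isNone) then false
    else
      let eRanges := parsedE.filterMap id
      let lRanges := parsedL.filterMap id
      lRanges.all (fun q => eRanges.any (fun e => decide (e.1 ≤ q.1) && decide (q.2 ≤ e.2)))

-- ===== PORT B =====
-- the parse-or-early-return-False loops of Source B
def pvParseAll (xs : List String) : Option (List (Int × Int)) :=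
  match xs with
  | [] => some []
  | x :: t =>
    match pvParsePort x with
    | none => none
    | some r =>
      match pvParseAll t with
      | none => none
      | some rs => some (r :: rs)

-- Source B's 'best' loop: running maximum of highs over the sorted ranges
def pvBuildBest (rs : List (Int × Int)) : List (Int × Int) :=
  (rs.foldl (fun (acc : List (Int × Int) × Option Int) p =>
      let cur : Int := match acc.2 with
        | none => p.2
        | some c => if p.2 > c then p.2 else c
      (acc.1 ++ [(p.1, cur)], some cur)) ([], none)).1

-- Source B's _last_le while loop (the index is always in range; getD only totalizes best[m])
def pvLastLe (best : List (Int × Int)) (l : Int) (a b : Nat) : Nat :=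
  if _h : a < b then
    let m := (a + b) / 2
    if (best.getD m (0, 0)).1 ≤ l then pvLastLe best l (m + 1) b
    else pvLastLe best l a m
  else a
termination_by b - a
decreasing_by all_goals omega

def ports_cover_py_alt (earlier : List String) (later : List String) : Bool :=
  if earlier = [] then true
  else if later = [] then false
  else
    match pvParseAll earlier with
    | none => false
    | some pe =>
      match pvParseAll later with
      | none => false
      | some pl =>
        let s := PySem.List.sorted pe (fun t => t.1) false
        let best := pvBuildBest s
        pl.all (fun q =>
          let r := pvLastLe best q.1 0 best.length
          if r = 0 then false
          else decide (q.2 ≤ (best.getD (r - 1) (0, 0)).2))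

-- ===== PRECONDITION & SPEC =====
def Spec_ports_cover_py (earlier : List String) (later : List String) (out : Bool) : Prop := out = ports_cover_py_alt earlier later
instance (earlier : List String) (later : List String) (out : Bool) : Decidable (Spec_ports_cover_py earlier later out) := by unfold Spec_ports_cover_py; infer_instance

-- ===== CLAIM (what is proved, stated in full; the proofs are below) =====
def Claim_equal_ports_cover_py : Prop := ∀ (earlier : List String) (later : List String), Dom_ports_cover_py earlier later → Spec_ports_cover_py earlier later (ports_cover_py earlier later)

-- ===== LEMMAS AND PROOFS =====

-- structural recursion equivalent of pvBuildBest's foldl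
def pvBB (rs : List (Int × Int)) (cur : Option Int) : List (Int × Int) :=
  match rs with
  | [] => []
  | p :: t =>
    let c : Int := match cur with
      | none => p.2
      | some c => if p.2 > c then p.2 else c
    (p.1, c) :: pvBB t (some c)

theorem pvBB_foldl (rs : List (Int × Int)) (acc : List (Int × Int)) (cur : Option Int) :
    (rs.foldl (fun (acc : List (Int × Int) × Option Int) p =>
      let cur : Int := match acc.2 with
        | none => p.2
        | some c => if p.2 > c then p.2 else c
      (acc.1 ++ [(p.1, cur)], some cur)) (acc, cur)).1 = acc ++ pvBB rs cur := by
  induction rs generalizing acc cur with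
  | nil => simp [pvBB]
  | cons p t ih => simp [pvBB, List.foldl_cons, ih]

theorem pvBuildBest_eq (rs : List (Int × Int)) : pvBuildBest rs = pvBB rs none := by
  simpa using pvBB_foldl rs [] none

theorem pvBB_map_fst (rs : List (Int × Int)) (cur : Option Int) :
    (pvBB rs cur).map Prod.fst = rs.map Prod.fst := by
  induction rs generalizing cur with
  | nil => rfl
  | cons p t ih => simp [pvBB, ih]

theorem pvBB_length (rs : List (Int × Int)) (cur : Option Int) :
    (pvBB rs cur).length = rs.length := by
  have := congrArg List.length (pvBB_map_fst rs cur)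
  simpa using this

theorem pvBB_fst (rs : List (Int × Int)) (cur : Option Int) (i : Nat) (h : i < rs.length) :
    ((pvBB rs cur).getD i (0, 0)).1 = (rs.getD i (0, 0)).1 := by
  rw [List.getD_eq_getElem _ _ (by rw [pvBB_length]; exact h), List.getD_eq_getElem _ _ h]
  have := congrArg (fun (l : List Int) => l[i]?) (pvBB_map_fst rs cur)
  simp only [List.getElem?_map] at this
  have h1 : (pvBB rs cur)[i]? = some ((pvBB rs cur)[i]'(by rw [pvBB_length]; exact h)) :=
    List.getElem?_eq_getElem _
  have h2 : rs[i]? = some (rs[i]'h) := List.getElem?_eq_getElem _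
  rw [h1, h2] at this
  simpa using this

-- prefix-maximum characterisation of the second components of pvBB
theorem pvBB_snd_iff (rs : List (Int × Int)) (cur : Option Int) (i : Nat) (h : i < rs.length)
    (x : Int) :
    x ≤ ((pvBB rs cur).getD i (0, 0)).2 ↔
      (∃ c, cur = some c ∧ x ≤ c) ∨ ∃ j, j ≤ i ∧ x ≤ (rs.getD j (0, 0)).2 := by
  induction rs generalizing cur i with
  | nil => simp at h
  | cons p t ih =>
    have hM : ∀ y : Int, (y ≤ (match cur with
        | none => p.2
        | some c => if p.2 > c then p.2 else c) : Prop) ↔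
        (∃ c, cur = some c ∧ y ≤ c) ∨ y ≤ p.2 := by
      intro y
      cases cur with
      | none => simp
      | some c0 =>
        simp only [Option.some.injEq]
        constructor
        · intro hy
          by_cases hpc : p.2 > c0
          · right; simpa [hpc] using hy
          · left; exact ⟨c0, rfl, by simpa [hpc] using hy⟩
        · rintro (⟨c, rfl, hy⟩ | hy) <;> split_ifs with hpc <;> omega
    cases i with
    | zero =>
      simp only [pvBB, List.getD_cons_zero]
      rw [hM]
      constructor
      · rintro (h1 | h1)
        · exact Or.inl h1
        · exact Or.inr ⟨0, le_refl 0, by simpa using h1⟩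
      · rintro (h1 | ⟨j, hj, hx⟩)
        · exact Or.inl h1
        · interval_cases j
          exact Or.inr (by simpa using hx)
    | succ i' =>
      have hi' : i' < t.length := by simpa using Nat.lt_of_succ_lt_succ h
      simp only [pvBB, List.getD_cons_succ]
      rw [ih _ i' hi']
      constructor
      · rintro (⟨c, hc, hx⟩ | ⟨j, hj, hx⟩)
        · rcases (hM x).mp (by cases hc; exact hx) with h1 | h1
          · exact Or.inl h1
          · exact Or.inr ⟨0, Nat.zero_le _, by simpa using h1⟩
        · exact Or.inr ⟨j + 1, Nat.succ_le_succ hj, by simpa using hx⟩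
      · rintro (h1 | ⟨j, hj, hx⟩)
        · exact Or.inl ⟨_, rfl, (hM x).mpr (Or.inl h1)⟩
        · cases j with
          | zero => exact Or.inl ⟨_, rfl, (hM x).mpr (Or.inr (by simpa using hx))⟩
          | succ j' =>
            exact Or.inr ⟨j', Nat.le_of_succ_le_succ hj, by simpa using hx⟩

-- binary-search loop specification on a list with nondecreasing first components
theorem pvLastLe_spec (bs : List (Int × Int)) (l : Int)
    (mono : ∀ i j, i ≤ j → j < bs.length →
      (bs.getD i (0, 0)).1 ≤ (bs.getD j (0, 0)).1) :
    ∀ n a b, b - a = n → a ≤ b → b ≤ bs.length →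
      (∀ i, i < a → (bs.getD i (0, 0)).1 ≤ l) →
      (∀ i, b ≤ i → i < bs.length → l < (bs.getD i (0, 0)).1) →
      (∀ i, i < pvLastLe bs l a b → (bs.getD i (0, 0)).1 ≤ l) ∧
      (∀ i, pvLastLe bs l a b ≤ i → i < bs.length → l < (bs.getD i (0, 0)).1) ∧
      pvLastLe bs l a b ≤ bs.length := by
  intro n
  induction n using Nat.strong_induction_on with
  | _ n IH =>
    intro a b hn hab hb ha hbp
    rw [pvLastLe]
    by_cases hlt : a < b
    · rw [dif_pos hlt]
      simp only
      by_cases hc : (bs.getD ((a + b) / 2) (0, 0)).1 ≤ l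
      · rw [if_pos hc]
        refine IH (b - ((a + b) / 2 + 1)) (by omega) ((a + b) / 2 + 1) b rfl (by omega) hb ?_ hbp
        intro i hi
        by_cases hia : i < a
        · exact ha i hia
        · exact le_trans (mono i ((a + b) / 2) (by omega) (by omega)) hc
      · rw [if_neg hc]
        refine IH ((a + b) / 2 - a) (by omega) a ((a + b) / 2) rfl (by omega) (by omega) ha ?_
        intro i hmi hil
        exact lt_of_lt_of_le (not_le.mp hc) (mono ((a + b) / 2) i hmi hil)
    · rw [dif_neg hlt]
      have hab' : a = b := by omega
      refine ⟨ha, ?_, by omega⟩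
      intro i hai hil
      exact hbp i (by omega) hil

-- the per-query equivalence: B's table lookup = A's linear any-scan
theorem pvCoverOne (pe : List (Int × Int)) (q : Int × Int) :
    (let s := PySem.List.sorted pe (fun t => t.1) false
     let best := pvBuildBest s
     let r := pvLastLe best q.1 0 best.length
     if r = 0 then false else decide (q.2 ≤ (best.getD (r - 1) (0, 0)).2))
    = pe.any (fun e => decide (e.1 ≤ q.1) && decide (q.2 ≤ e.2)) := by
  dsimp only
  set s := PySem.List.sorted pe (fun t => t.1) false with hs
  set best := pvBuildBest s with hbest
  have hlen : best.length = s.length := by rw [hbest, pvBuildBest_eq]; exact pvBB_length s none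
  have hfst : ∀ i, i < s.length → (best.getD i (0, 0)).1 = (s.getD i (0, 0)).1 := by
    intro i hi; rw [hbest, pvBuildBest_eq]; exact pvBB_fst s none i hi
  have hmonoS : ∀ i j, i ≤ j → j < s.length →
      (s.getD i (0, 0)).1 ≤ (s.getD j (0, 0)).1 := by
    intro i j hij hj
    rw [List.getD_eq_getElem _ _ (lt_of_le_of_lt hij hj), List.getD_eq_getElem _ _ hj]
    exact PySem.List.key_sorted_getElem_mono pe (fun t => t.1) hij hj
  have hmono : ∀ i j, i ≤ j → j < best.length →
      (best.getD i (0, 0)).1 ≤ (best.getD j (0, 0)).1 := by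
    intro i j hij hj
    rw [hfst i (by omega), hfst j (by omega)]
    exact hmonoS i j hij (by omega)
  obtain ⟨h1, h2, h3⟩ := pvLastLe_spec best q.1 hmono best.length 0 best.length rfl
    (Nat.zero_le _) le_rfl (fun i hi => absurd hi (Nat.not_lt_zero i))
    (fun i hbi hil => absurd (lt_of_le_of_lt hbi hil) (lt_irrefl _))
  set r := pvLastLe best q.1 0 best.length with hr
  have hany : pe.any (fun e => decide (e.1 ≤ q.1) && decide (q.2 ≤ e.2)) = true ↔
      ∃ j, j < s.length ∧ (s.getD j (0, 0)).1 ≤ q.1 ∧ q.2 ≤ (s.getD j (0, 0)).2 := by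
    rw [List.any_eq_true]
    constructor
    · rintro ⟨e, he, hpe⟩
      simp only [Bool.and_eq_true, decide_eq_true_eq] at hpe
      have hes : e ∈ s := (PySem.List.mem_sorted pe (fun t => t.1) false e).mpr he
      obtain ⟨j, hj, hje⟩ := List.mem_iff_getElem.mp hes
      refine ⟨j, hj, ?_, ?_⟩
      · rw [List.getD_eq_getElem _ _ hj, hje]; exact hpe.1
      · rw [List.getD_eq_getElem _ _ hj, hje]; exact hpe.2
    · rintro ⟨j, hj, hle, hhi⟩
      refine ⟨s.getD j (0, 0), ?_, by
        simp only [Bool.and_eq_true, decide_eq_true_eq]; exact ⟨hle, hhi⟩⟩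
      exact (PySem.List.mem_sorted pe (fun t => t.1) false _).mp
        (by rw [List.getD_eq_getElem _ _ hj]; exact List.getElem_mem hj)
  have hpm : ∀ i, i < s.length →
      (q.2 ≤ (best.getD i (0, 0)).2 ↔ ∃ j, j ≤ i ∧ q.2 ≤ (s.getD j (0, 0)).2) := by
    intro i hi
    rw [hbest, pvBuildBest_eq]
    simpa using pvBB_snd_iff s none i hi q.2
  by_cases hr0 : r = 0
  · rw [if_pos hr0]
    cases hpe : pe.any (fun e => decide (e.1 ≤ q.1) && decide (q.2 ≤ e.2)) with
    | false => rfl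
    | true =>
      exfalso
      obtain ⟨j, hj, hle, _⟩ := hany.mp hpe
      have := h2 j (by omega) (by omega)
      rw [hfst j hj] at this
      omega
  · rw [if_neg hr0]
    have hr1 : r - 1 < s.length := by omega
    cases hpe : pe.any (fun e => decide (e.1 ≤ q.1) && decide (q.2 ≤ e.2)) with
    | false =>
      refine decide_eq_false ?_
      intro hbd
      obtain ⟨j, hj, hhi⟩ := (hpm (r - 1) hr1).mp hbd
      have hjr : j < r := by omega
      have hle : (s.getD j (0, 0)).1 ≤ q.1 := by
        rw [← hfst j (by omega)]; exact h1 j hjr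
      exact absurd (hany.mpr ⟨j, by omega, hle, hhi⟩) (by simp [hpe])
    | true =>
      refine decide_eq_true ?_
      obtain ⟨j, hj, hle, hhi⟩ := hany.mp hpe
      have hjr : j < r := by
        by_contra hge
        have := h2 j (by omega) (by omega)
        rw [hfst j hj] at this
        omega
      exact (hpm (r - 1) hr1).mpr ⟨j, by omega, hhi⟩

theorem pvAllCongr (l : List (Int × Int)) (p q : (Int × Int) → Bool)
    (h : ∀ x ∈ l, p x = q x) : l.all p = l.all q := by
  induction l with
  | nil => rfl
  | cons x t ih => simp only [List.all_cons, h x (by simp), ih (fun y hy => h y (by simp [hy]))]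

theorem pvParseAll_eq (xs : List String) :
    pvParseAll xs =
      if (xs.map pvParsePort).any (fun p => p.isNone) then none
      else some ((xs.map pvParsePort).filterMap id) := by
  induction xs with
  | nil => simp [pvParseAll]
  | cons x t ih =>
    cases hx : pvParsePort x with
    | none => simp [pvParseAll, hx]
    | some r =>
      by_cases h : (t.map pvParsePort).any (fun p => p.isNone) <;>
        simp [pvParseAll, hx, ih, h]

-- ===== VERDICT (by name: the statement is the Claim_ definition above) =====
theorem ports_cover_py_spec : Claim_equal_ports_cover_py := by
  intro earlier later _
  unfold Spec_ports_cover_py ports_cover_py ports_cover_py_alt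
  by_cases he : earlier = []
  · simp [he]
  · by_cases hl : later = []
    · simp [he, hl]
    · simp only [he, hl, if_false]
      rw [pvParseAll_eq earlier, pvParseAll_eq later]
      by_cases hE : (earlier.map pvParsePort).any (fun p => p.isNone)
      · simp [hE, List.any_append]
      · by_cases hL : (later.map pvParsePort).any (fun p => p.isNone)
        · simp [hE, hL, List.any_append]
        · simp only [hE, hL, List.any_append, Bool.or_eq_true, if_neg, Bool.false_eq_true,
            or_self, not_false_eq_true]
          exact (pvAllCongr _ _ _ (fun q _ => pvCoverOne _ q)).symm
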